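-- pv_equiv track=rewrite | github.com/spirka5/xp | GeneralisedRomanNumber.py | are_letters_valid
-- ===== SOURCE A (Python) =====
-- def are_letters_valid(letters):
--     if len(letters) < 3:
--         return False
--
--     if not ("A" <= letters[0] <= "Z" or letters[0] == "-"):
--         return False
--
--     for letter in letters[1:]:
--         if not ("A" <= letter <= "Z"):
--             return False
--
--     if len(letters) != len(set(letters)):
--         return False
--
--     return True
-- ===== SOURCE B (Python) =====
-- def are_letters_valid(letters):
--     if len(letters) < 3:
--         return False
--     seen = set()
--     for i, ch in enumerate(letters):
--         if ch in seen:
--             return False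
--         seen.add(ch)
--         if 'A' <= ch <= 'Z':
--             continue
--         if i == 0 and ch == '-':
--             continue
--         return False
--     return True
-- ===== Notes on version B (the rewrite author's own statement) =====
-- stated objective: alternative
-- what changed: Replaces A's three separate passes (first-char check, tail range loop, set(letters) length comparison) with one indexed loop that maintains a seen set incrementally and short-circuits on the first bad or repeated character.
import Mathlib
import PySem

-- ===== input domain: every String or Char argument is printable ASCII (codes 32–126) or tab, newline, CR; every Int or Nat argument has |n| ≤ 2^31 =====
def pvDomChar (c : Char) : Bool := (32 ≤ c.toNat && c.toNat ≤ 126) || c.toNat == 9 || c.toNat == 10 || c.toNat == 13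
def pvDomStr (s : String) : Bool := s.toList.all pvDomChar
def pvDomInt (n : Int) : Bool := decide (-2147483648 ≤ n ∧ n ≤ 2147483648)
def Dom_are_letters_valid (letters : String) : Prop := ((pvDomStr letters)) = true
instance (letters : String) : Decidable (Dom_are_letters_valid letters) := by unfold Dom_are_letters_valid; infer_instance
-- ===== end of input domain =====

-- B fuses A's three separate checks into one indexed short-circuiting pass with an incremental seen set (alternative decomposition, same cost).

-- ===== PORT A =====
def are_letters_valid (letters : String) : Bool :=
  let cs := letters.toList
  if cs.length < 3 then false
  else
    match cs with
    | [] => false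
    | c0 :: rest =>
      if !(('A' ≤ c0 && c0 ≤ 'Z') || c0 == '-') then false
      else if !(rest.all fun c => 'A' ≤ c && c ≤ 'Z') then false
      else if cs.length ≠ (PySem.Set.ofList cs).length then false
      else true

-- ===== PORT B =====
def altLoop : List Char → Nat → PySem.Set Char → Bool
  | [], _, _ => true
  | c :: rest, i, seen =>
    if PySem.Set.contains seen c then false
    else
      let seen' := PySem.Set.add seen c
      if 'A' ≤ c && c ≤ 'Z' then altLoop rest (i + 1) seen'
      else if i == 0 && c == '-' then altLoop rest (i + 1) seen'
      else false

def are_letters_valid_alt (letters : String) : Bool :=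
  if letters.toList.length < 3 then false
  else altLoop letters.toList 0 PySem.Set.empty

-- ===== PRECONDITION & SPEC =====
def Spec_are_letters_valid (letters : String) (out : Bool) : Prop := out = are_letters_valid_alt letters
instance (letters : String) (out : Bool) : Decidable (Spec_are_letters_valid letters out) := by unfold Spec_are_letters_valid; infer_instance

-- ===== CLAIM (what is proved, stated in full; the proofs are below) =====
def Claim_equal_are_letters_valid : Prop := ∀ (letters : String), Dom_are_letters_valid letters → Spec_are_letters_valid letters (are_letters_valid letters)

-- ===== LEMMAS AND PROOFS =====

-- B's tail loop (index ≥ 1): true iff every char is in range, the suffix is duplicate-free, and no char was seen before.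
theorem altLoop_tail (l : List Char) : ∀ (i : Nat) (seen : PySem.Set Char),
    altLoop l (i + 1) seen = true ↔
      (∀ c ∈ l, 'A' ≤ c ∧ c ≤ 'Z') ∧ l.Nodup ∧ ∀ c ∈ l, c ∉ seen := by
  induction l with
  | nil => intro i seen; simp [altLoop]
  | cons c rest ih =>
    intro i seen
    rw [show altLoop (c :: rest) (i + 1) seen =
      (if PySem.Set.contains seen c then false
       else if 'A' ≤ c && c ≤ 'Z' then altLoop rest (i + 1 + 1) (PySem.Set.add seen c)
       else if (i + 1 == 0) && c == '-' then altLoop rest (i + 1 + 1) (PySem.Set.add seen c)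
       else false) from rfl]
    by_cases hc : c ∈ seen
    · rw [if_pos ((PySem.Set.contains_iff seen c).mpr hc)]
      constructor
      · intro h; cases h
      · rintro ⟨_, _, h3⟩; exact absurd hc (h3 c (by simp))
    · rw [if_neg (fun h => hc ((PySem.Set.contains_iff seen c).mp h))]
      by_cases hr : ('A' ≤ c && c ≤ 'Z') = true
      · rw [if_pos hr, ih]
        simp only [Bool.and_eq_true, decide_eq_true_eq] at hr
        constructor
        · rintro ⟨h1, h2, h3⟩
          refine ⟨?_, ?_, ?_⟩
          · intro x hx; rcases List.mem_cons.mp hx with h | h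
            · exact h ▸ hr
            · exact h1 x h
          · refine List.nodup_cons.mpr ⟨fun hmem => ?_, h2⟩
            have := h3 c hmem
            rw [PySem.Set.mem_add] at this
            exact this (Or.inr rfl)
          · intro x hx
            rcases List.mem_cons.mp hx with h | h
            · exact h ▸ hc
            · have := h3 x h
              rw [PySem.Set.mem_add] at this
              exact fun hm => this (Or.inl hm)
        · rintro ⟨h1, h2, h3⟩
          refine ⟨fun x hx => h1 x (List.mem_cons_of_mem _ hx), (List.nodup_cons.mp h2).2, ?_⟩
          intro x hx
          rw [PySem.Set.mem_add]
          rintro (hm | he)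
          · exact h3 x (List.mem_cons_of_mem _ hx) hm
          · exact (List.nodup_cons.mp h2).1 (he ▸ hx)
      · rw [if_neg hr]
        rw [if_neg (by simp)]
        simp only [Bool.and_eq_true, decide_eq_true_eq, not_and_or] at hr
        constructor
        · intro h; cases h
        · rintro ⟨h1, _⟩
          have := h1 c (by simp)
          rcases hr with h | h <;> [exact absurd this.1 (by simpa using h);
            exact absurd this.2 (by simpa using h)]

-- |set(xs)| = |xs| iff xs has no duplicates.
theorem len_ofList_eq_iff (xs : List Char) :
    ((PySem.Set.ofList xs).length = xs.length) ↔ xs.Nodup := by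
  have hperm : (PySem.Set.ofList xs).Perm xs.dedup := by
    rw [List.perm_ext_iff_of_nodup (PySem.Set.nodup_ofList (xs := xs)) (List.nodup_dedup xs)]
    intro a; simp [PySem.Set.mem_ofList, List.mem_dedup]
  rw [hperm.length_eq]
  constructor
  · intro h
    have := (List.dedup_sublist xs).eq_of_length h
    rw [← this]; exact List.nodup_dedup xs
  · intro h; rw [List.dedup_eq_self.mpr h]

-- ===== VERDICT (by name: the statement is the Claim_ definition above) =====
theorem are_letters_valid_spec : Claim_equal_are_letters_valid := by
  intro letters _
  show are_letters_valid letters = are_letters_valid_alt letters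
  unfold are_letters_valid are_letters_valid_alt
  generalize letters.toList = cs
  by_cases h3 : cs.length < 3
  · rw [if_pos h3, if_pos h3]
  · rw [if_neg h3, if_neg h3]
    match cs with
    | [] => exact absurd (by simp) h3
    | c0 :: rest =>
      show (if !(('A' ≤ c0 && c0 ≤ 'Z') || c0 == '-') then false
            else if !(rest.all fun c => 'A' ≤ c && c ≤ 'Z') then false
            else if (c0 :: rest).length ≠ (PySem.Set.ofList (c0 :: rest)).length then false
            else true) = altLoop (c0 :: rest) 0 PySem.Set.empty
      rw [Bool.eq_iff_iff]
      -- right-hand side: one step of the fused loop, then the tail characterisation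
      have hB : altLoop (c0 :: rest) 0 PySem.Set.empty = true ↔
          ((('A' ≤ c0 ∧ c0 ≤ 'Z') ∨ c0 = '-') ∧
            (∀ c ∈ rest, 'A' ≤ c ∧ c ≤ 'Z') ∧ rest.Nodup ∧ c0 ∉ rest) := by
        rw [show altLoop (c0 :: rest) 0 PySem.Set.empty =
          (if PySem.Set.contains PySem.Set.empty c0 then false
           else if 'A' ≤ c0 && c0 ≤ 'Z' then altLoop rest (0 + 1) (PySem.Set.add PySem.Set.empty c0)
           else if (0 == 0) && c0 == '-' then altLoop rest (0 + 1) (PySem.Set.add PySem.Set.empty c0)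
           else false) from rfl]
        have hadd : PySem.Set.add PySem.Set.empty c0 = [c0] := rfl
        rw [show PySem.Set.contains PySem.Set.empty c0 = false from rfl]
        rw [if_neg (by simp), hadd]
        have htail := altLoop_tail rest 0 [c0]
        have hlast : (∀ c ∈ rest, c ∉ ([c0] : List Char)) ↔ c0 ∉ rest := by
          constructor
          · intro h hm; exact h c0 hm (by simp)
          · intro h x hx hm
            exact h ((List.mem_singleton.mp hm) ▸ hx)
        by_cases hr : ('A' ≤ c0 && c0 ≤ 'Z') = true
        · rw [if_pos hr, htail, hlast]
          simp only [Bool.and_eq_true, decide_eq_true_eq] at hr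
          constructor
          · rintro ⟨h1, h2, h3⟩; exact ⟨Or.inl hr, h1, h2, h3⟩
          · rintro ⟨_, h1, h2, h3⟩; exact ⟨h1, h2, h3⟩
        · rw [if_neg hr]
          simp only [Bool.and_eq_true, decide_eq_true_eq, not_and_or] at hr
          by_cases hd : c0 = '-'
          · rw [if_pos (by simp [hd]), htail, hlast]
            constructor
            · rintro ⟨h1, h2, h3⟩; exact ⟨Or.inr hd, h1, h2, h3⟩
            · rintro ⟨_, h1, h2, h3⟩; exact ⟨h1, h2, h3⟩
          · rw [if_neg (by simp [hd])]
            constructor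
            · intro h; cases h
            · rintro ⟨h1, _⟩
              rcases h1 with h | h
              · rcases hr with hx | hx <;> [exact absurd h.1 (by simpa using hx);
                  exact absurd h.2 (by simpa using hx)]
              · exact absurd h hd
      rw [hB]
      -- left-hand side: A's three sequential checks
      have hnod : ((c0 :: rest).length = (PySem.Set.ofList (c0 :: rest)).length) ↔
          (c0 ∉ rest ∧ rest.Nodup) := by
        rw [eq_comm, len_ofList_eq_iff, List.nodup_cons]
      by_cases h1 : (('A' ≤ c0 && c0 ≤ 'Z') || c0 == '-') = true
      · rw [if_neg (by simp [h1])]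
        by_cases h2 : (rest.all fun c => 'A' ≤ c && c ≤ 'Z') = true
        · rw [if_neg (by simp [h2])]
          simp only [Bool.or_eq_true, Bool.and_eq_true, decide_eq_true_eq, beq_iff_eq] at h1
          simp only [List.all_eq_true, Bool.and_eq_true, decide_eq_true_eq] at h2
          by_cases hn : (c0 :: rest).length = (PySem.Set.ofList (c0 :: rest)).length
          · rw [if_neg (by simpa using hn)]
            simp only [true_iff]
            exact ⟨h1, h2, (hnod.mp hn).2, (hnod.mp hn).1⟩
          · rw [if_pos hn]
            simp only [Bool.false_eq_true, false_iff]
            rintro ⟨_, _, hnd, hnm⟩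
            exact hn (hnod.mpr ⟨hnm, hnd⟩)
        · have hb2 : (rest.all fun c => 'A' ≤ c && c ≤ 'Z') = false :=
            Bool.eq_false_iff.mpr h2
          rw [if_pos (by rw [hb2]; rfl)]
          simp only [Bool.false_eq_true, false_iff]
          rintro ⟨_, hrest, _⟩
          refine h2 (List.all_eq_true.mpr fun c hc => ?_)
          have := hrest c hc
          simp [this.1, this.2]
      · have hb1 : (('A' ≤ c0 && c0 ≤ 'Z') || c0 == '-') = false :=
            Bool.eq_false_iff.mpr h1
        rw [if_pos (by rw [hb1]; rfl)]
        simp only [Bool.false_eq_true, false_iff]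
        rintro ⟨hfirst, _⟩
        refine h1 ?_
        rcases hfirst with h | h
        · simp [h.1, h.2]
        · simp [h]
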